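-- pv_equiv track=rewrite | github.com/sudoddbe/yahtzee | yahtzee_probability.py | tuple_is_subset
-- ===== SOURCE A (Python) =====
-- def tuple_is_subset(big_set, small_set):
--     N_small = len(small_set)
--     if N_small == 0:
--         return (True, big_set)
--     N_big = len(big_set)
--     tmp_set = [e for e in big_set]
--     for es in small_set:
--         if es in tmp_set:
--             tmp_set.remove(es)
--         else:
--             #Not a subset
--             return (False, None)
--     return (True, tmp_set)
-- ===== SOURCE B (Python) =====
-- def tuple_is_subset(big_set, small_set):
--     # Count how many of each value must be removed, then make ONE ordered pass
--     # over big_set, skipping the first `need[e]` occurrences of each value e.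
--     need = {}
--     for e in small_set:
--         need[e] = need.get(e, 0) + 1
--     remaining = len(small_set)
--     out = []
--     for e in big_set:
--         if need.get(e, 0) > 0:
--             need[e] -= 1
--             remaining -= 1
--         else:
--             out.append(e)
--     if remaining != 0:
--         return (False, None)
--     return (True, out)
-- ===== Notes on version B (the rewrite author's own statement) =====
-- stated objective: faster
-- what changed: Replaced the per-element 'in'+'remove' scans over a mutable copy of big_set by a counting dict built from small_set and a single ordered pass over big_set that skips the first need[e] occurrences of each value.
import Mathlib
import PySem

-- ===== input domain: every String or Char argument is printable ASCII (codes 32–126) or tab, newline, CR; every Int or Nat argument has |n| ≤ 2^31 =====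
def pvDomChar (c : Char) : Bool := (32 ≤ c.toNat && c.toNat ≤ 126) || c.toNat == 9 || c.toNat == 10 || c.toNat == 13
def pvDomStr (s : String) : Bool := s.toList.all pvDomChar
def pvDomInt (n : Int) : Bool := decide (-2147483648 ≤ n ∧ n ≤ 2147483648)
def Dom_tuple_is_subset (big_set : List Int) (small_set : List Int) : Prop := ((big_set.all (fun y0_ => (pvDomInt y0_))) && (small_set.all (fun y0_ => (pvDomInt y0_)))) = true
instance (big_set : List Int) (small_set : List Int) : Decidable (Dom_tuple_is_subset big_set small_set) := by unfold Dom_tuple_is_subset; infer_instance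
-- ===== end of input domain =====

-- B replaces A's repeated membership-test + first-occurrence removal on a mutable copy of
-- big_set by a counting dict over small_set and one ordered pass over big_set (faster).

-- ===== PORT A =====
-- the 'for es in small_set' loop: tmp_set is the mutable copy
def pvLoopA : List Int → List Int → Bool × Option (List Int)
  | tmp, [] => (true, some tmp)
  | tmp, es :: rest =>
    if tmp.contains es then pvLoopA ((PySem.List.remove? tmp es).getD tmp) rest
    else (false, none)

def tuple_is_subset (big_set : List Int) (small_set : List Int) : Bool × Option (List Int) :=
  if small_set.length = 0 then (true, some big_set)
  else pvLoopA big_set small_set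

-- ===== PORT B =====
-- state of Source B's 'for e in big_set' loop: (need, remaining, out)
def pvStepB (s : PySem.Dict Int Int × Int × List Int) (e : Int) : PySem.Dict Int Int × Int × List Int :=
  if s.1.getD e 0 > 0 then (s.1.insert e (s.1.getD e 0 - 1), s.2.1 - 1, s.2.2)
  else (s.1, s.2.1, s.2.2 ++ [e])

def tuple_is_subset_alt (big_set : List Int) (small_set : List Int) : Bool × Option (List Int) :=
  let need := small_set.foldl (fun d e => d.insert e (d.getD e 0 + 1)) PySem.Dict.empty
  let res := big_set.foldl pvStepB (need, (small_set.length : Int), [])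
  if res.2.1 ≠ 0 then (false, none) else (true, some res.2.2)

-- ===== PRECONDITION & SPEC =====
def Spec_tuple_is_subset (big_set : List Int) (small_set : List Int) (out : Bool × Option (List Int)) : Prop := out = tuple_is_subset_alt big_set small_set
instance (big_set : List Int) (small_set : List Int) (out : Bool × Option (List Int)) : Decidable (Spec_tuple_is_subset big_set small_set out) := by unfold Spec_tuple_is_subset; infer_instance

-- ===== CLAIM (what is proved, stated in full; the proofs are below) =====
def Claim_equal_tuple_is_subset : Prop := ∀ (big_set : List Int) (small_set : List Int), Dom_tuple_is_subset big_set small_set → Spec_tuple_is_subset big_set small_set (tuple_is_subset big_set small_set)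

-- ===== LEMMAS AND PROOFS =====

-- abstract model of B's big_set pass: given a demand function f, return
-- (number of consumed elements, list of kept elements, in order)
def pvRun : List Int → (Int → Int) → (Int × List Int)
  | [], _ => (0, [])
  | e :: rest, f =>
    if f e > 0 then
      let r := pvRun rest (Function.update f e (f e - 1)); (r.1 + 1, r.2)
    else
      let r := pvRun rest f; (r.1, e :: r.2)

def pvCnt (small : List Int) : Int → Int := fun v => (small.count v : Int)

theorem pvRun_zero (big : List Int) (f : Int → Int) (h : ∀ v, ¬ f v > 0) :
    pvRun big f = (0, big) := by
  induction big with
  | nil => rfl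
  | cons e rest ih => simp [pvRun, h e, ih]

theorem pvRun_update_notmem (big : List Int) (f : Int → Int) (es x : Int) (h : es ∉ big) :
    pvRun big (Function.update f es x) = pvRun big f := by
  induction big generalizing f with
  | nil => rfl
  | cons e rest ih =>
    have hne : e ≠ es := by rintro rfl; exact h (List.mem_cons_self)
    have hrest : es ∉ rest := fun hm => h (List.mem_cons_of_mem _ hm)
    simp only [pvRun, Function.update_of_ne hne]
    by_cases hf : f e > 0
    · simp only [hf, if_pos]
      rw [Function.update_comm hne.symm (f := f), ih _ hrest]
    · simp only [hf, ih _ hrest]; simp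

theorem pvRun_inc (big : List Int) (f : Int → Int) (es : Int)
    (hf : ∀ v, 0 ≤ f v) (h : es ∈ big) :
    pvRun big (Function.update f es (f es + 1)) =
      ((pvRun (big.erase es) f).1 + 1, (pvRun (big.erase es) f).2) := by
  induction big generalizing f with
  | nil => cases h
  | cons e rest ih =>
    by_cases he : e = es
    · subst he
      have hpos : Function.update f e (f e + 1) e > 0 := by
        simp [Function.update_self]; linarith [hf e]
      simp only [pvRun, hpos, if_pos, List.erase_cons_head]
      have : Function.update (Function.update f e (f e + 1)) e (Function.update f e (f e + 1) e - 1) = f := by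
        funext v; by_cases hv : v = e <;> simp [Function.update, hv]
      rw [this]
    · have hne : e ≠ es := he
      have hrest : es ∈ rest := by cases h with | head => exact absurd rfl hne | tail _ hm => exact hm
      have herase : (e :: rest).erase es = e :: rest.erase es := by
        rw [List.erase_cons_tail]; simp [hne]
      have hgv : Function.update f es (f es + 1) e = f e := Function.update_of_ne hne _ f
      by_cases hfe : f e > 0
      · simp only [pvRun, hgv, hfe, if_pos, herase]
        have hcomm : Function.update (Function.update f es (f es + 1)) e (f e - 1)
            = Function.update (Function.update f e (f e - 1)) es (Function.update f e (f e - 1) es + 1) := by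
          funext v
          by_cases hv : v = e
          · subst hv; simp [Function.update, hne]
          · by_cases hv2 : v = es <;> simp [Function.update, hv, hv2, Ne.symm hne]
        have hf' : ∀ v, 0 ≤ Function.update f e (f e - 1) v := by
          intro v
          by_cases hv : v = e
          · subst hv; rw [Function.update_self]; omega
          · rw [Function.update_of_ne hv]; exact hf v
        rw [hcomm, ih _ hf' hrest]
      · simp only [pvRun, hgv, hfe, if_neg, not_false_iff, herase]
        rw [ih _ hf hrest]

theorem pvRun_count_le (big small : List Int) :
    (pvRun big (pvCnt small)).1 ≤ (small.length : Int) := by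
  induction big generalizing small with
  | nil => simp [pvRun]
  | cons e rest ih =>
    by_cases hpos : pvCnt small e > 0
    · have hmem : e ∈ small := by
        unfold pvCnt at hpos
        exact List.count_pos_iff.mp (by exact_mod_cast hpos)
      have hupd : Function.update (pvCnt small) e (pvCnt small e - 1) = pvCnt (small.erase e) := by
        funext v
        by_cases hv : v = e
        · subst hv
          have h1 : 1 ≤ small.count v := List.count_pos_iff.mpr hmem
          simp only [Function.update_self, pvCnt, List.count_erase_self]
          omega
        · simp only [Function.update_of_ne hv, pvCnt, List.count_erase_of_ne hv]
      have hlen : (small.erase e).length + 1 = small.length := List.length_erase_add_one hmem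
      simp only [pvRun, hpos, if_pos, hupd]
      have := ih (small.erase e)
      omega
    · simp only [pvRun, hpos, if_neg, not_false_iff]
      exact ih small

-- A's loop equals the model run with the count function of the remaining small_set
theorem pvLoopA_eq (small big : List Int) :
    pvLoopA big small =
      (if ((small.length : Int) - (pvRun big (pvCnt small)).1) ≠ 0 then (false, none)
       else (true, some (pvRun big (pvCnt small)).2)) := by
  induction small generalizing big with
  | nil =>
    rw [pvRun_zero big _ (by intro v; simp [pvCnt])]
    simp [pvLoopA]
  | cons es rest ih =>
    have hcnt : pvCnt (es :: rest) = Function.update (pvCnt rest) es (pvCnt rest es + 1) := by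
      funext v
      by_cases hv : v = es
      · subst hv; simp [pvCnt, List.count_cons_self]
      · have hv' : ¬ es = v := fun h => hv h.symm
        simp [pvCnt, Function.update_of_ne hv, hv']
    by_cases hmem : es ∈ big
    · have hrm : PySem.List.remove? big es = some (big.erase es) :=
        PySem.List.remove?_eq_some_erase big es hmem
      have hc : big.contains es = true := by simpa using hmem
      simp only [pvLoopA, hc, if_pos, hrm, Option.getD_some]
      rw [ih (big.erase es), hcnt,
        pvRun_inc big (pvCnt rest) es (by intro v; simp [pvCnt]) hmem]
      have harith : ((es :: rest).length : Int) - ((pvRun (big.erase es) (pvCnt rest)).1 + 1)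
          = (rest.length : Int) - (pvRun (big.erase es) (pvCnt rest)).1 := by
        simp [List.length_cons]
      rw [harith]
    · have hc : big.contains es = false := by simpa using hmem
      have hbound := pvRun_count_le big rest
      rw [hcnt] at *
      have hrw : pvRun big (Function.update (pvCnt rest) es (pvCnt rest es + 1)) = pvRun big (pvCnt rest) :=
        pvRun_update_notmem big (pvCnt rest) es _ hmem
      simp only [pvLoopA, hc, Bool.false_eq_true, if_neg, not_false_iff, hrw]
      have hcond : ((es :: rest).length : Int) - (pvRun big (pvCnt rest)).1 ≠ 0 := by
        simp only [List.length_cons]; push_cast; omega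
      rw [if_pos hcond]

-- the dict built by Source B's first loop is the counter of small_set
theorem pvNeed_getD (small : List Int) (d : PySem.Dict Int Int) (v : Int) :
    (small.foldl (fun d e => d.insert e (d.getD e 0 + 1)) d).getD v 0
      = d.getD v 0 + (small.count v : Int) := by
  induction small generalizing d with
  | nil => simp
  | cons e rest ih =>
    simp only [List.foldl_cons, ih, PySem.Dict.getD_insert]
    by_cases hv : v = e
    · subst hv; simp [List.count_cons_self]; ring
    · have hv' : ¬ e = v := fun h => hv h.symm
      simp [hv, hv']

-- B's big_set fold equals the model run
theorem pvFoldB_eq (big : List Int) (need : PySem.Dict Int Int) (r : Int) (out0 : List Int) :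
    ∃ d, big.foldl pvStepB (need, r, out0)
      = (d, r - (pvRun big (fun v => need.getD v 0)).1,
           out0 ++ (pvRun big (fun v => need.getD v 0)).2) := by
  induction big generalizing need r out0 with
  | nil => exact ⟨need, by simp [pvRun]⟩
  | cons e rest ih =>
    by_cases hpos : need.getD e 0 > 0
    · have hfun : (fun v => (need.insert e (need.getD e 0 - 1)).getD v 0)
          = Function.update (fun v => need.getD v 0) e (need.getD e 0 - 1) := by
        funext v
        by_cases hv : v = e <;> simp [PySem.Dict.getD_insert, Function.update, hv]
      obtain ⟨d, hd⟩ := ih (need.insert e (need.getD e 0 - 1)) (r - 1) out0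
      refine ⟨d, ?_⟩
      simp only [List.foldl_cons, pvStepB, hpos, if_pos, hd, hfun, pvRun, Prod.mk.injEq]
      exact ⟨trivial, by ring, trivial⟩
    · obtain ⟨d, hd⟩ := ih need r (out0 ++ [e])
      refine ⟨d, ?_⟩
      simp only [List.foldl_cons, pvStepB, hpos, if_neg, not_false_iff, hd, pvRun]
      simp

theorem tuple_is_subset_alt_eq (big small : List Int) :
    tuple_is_subset_alt big small =
      (if ((small.length : Int) - (pvRun big (pvCnt small)).1) ≠ 0 then (false, none)
       else (true, some (pvRun big (pvCnt small)).2)) := by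
  unfold tuple_is_subset_alt
  obtain ⟨d, hd⟩ := pvFoldB_eq big
    (small.foldl (fun d e => d.insert e (d.getD e 0 + 1)) PySem.Dict.empty)
    (small.length : Int) []
  have hfun : (fun v => (small.foldl (fun d e => d.insert e (d.getD e 0 + 1)) PySem.Dict.empty).getD v 0)
      = pvCnt small := by
    funext v; rw [pvNeed_getD]; simp [pvCnt]
  rw [hfun] at hd
  simp only [hd]
  split_ifs with h
  · rfl
  · simp

-- ===== VERDICT (by name: the statement is the Claim_ definition above) =====
theorem tuple_is_subset_spec : Claim_equal_tuple_is_subset := by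
  intro big small _
  unfold Spec_tuple_is_subset tuple_is_subset
  rw [tuple_is_subset_alt_eq, pvLoopA_eq]
  by_cases h : small.length = 0
  · have hs : small = [] := List.length_eq_zero_iff.mp h
    subst hs
    rw [pvRun_zero big _ (by intro v; simp [pvCnt])]
    simp
  · rw [if_neg h]
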